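-- pv_equiv track=rewrite | github.com/jagaldol/Algorithm-problem-solving | 프로그래머스/3/152995. 인사고과/인사고과.py | solution
-- ===== SOURCE A (Python) =====
-- def solution(scores):
--     failed = [False for _ in scores]
--     scores = [(idx, score) for idx, score in enumerate(scores)]
--
--     sorted_scores = sorted(scores, key=lambda x: (-x[1][0], x[1][1]))
--
--     max_value = sorted_scores[0][1][1]
--
--     for idx, score in sorted_scores:
--         if score[1] < max_value:
--             failed[idx] = True
--         else:
--             max_value = score[1]
--
--     if failed[0]:
--         return -1
--
--     my_score = sum(scores[0][1])
--
--     return sum([1 for idx, score in scores if not failed[idx] and sum(score) > my_score]) + 1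
-- ===== SOURCE B (Python) =====
-- def solution(scores):
--     def dominated(s):
--         return any(o[0] > s[0] and o[1] > s[1] for o in scores)
--
--     if dominated(scores[0]):
--         return -1
--     my_score = sum(scores[0])
--     return 1 + sum(1 for s in scores if sum(s) > my_score and not dominated(s))
-- ===== Notes on version B (the rewrite author's own statement) =====
-- stated objective: simpler
-- what changed: B drops A's sort-then-running-max pass and the failed[] array entirely: a person is dominated iff some other person beats them strictly in both scores, tested by a direct pairwise 'any' scan; the count is one comprehension over the original list.
-- outside the precondition, e.g. on solution([]): A raises IndexError, B raises IndexError; on solution([[1]]): A raises IndexError, B returns 1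
import Mathlib
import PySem

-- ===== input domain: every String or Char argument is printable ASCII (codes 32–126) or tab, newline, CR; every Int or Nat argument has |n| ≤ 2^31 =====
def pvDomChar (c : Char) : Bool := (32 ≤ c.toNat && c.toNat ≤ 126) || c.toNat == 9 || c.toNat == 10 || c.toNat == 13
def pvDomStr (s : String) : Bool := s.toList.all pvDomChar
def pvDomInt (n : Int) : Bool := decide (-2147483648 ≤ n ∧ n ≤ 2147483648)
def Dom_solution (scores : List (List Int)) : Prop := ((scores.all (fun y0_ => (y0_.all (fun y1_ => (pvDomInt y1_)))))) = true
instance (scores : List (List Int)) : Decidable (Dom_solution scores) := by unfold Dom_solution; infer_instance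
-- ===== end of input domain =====

-- B replaces A's sort + running-max pass (and the failed[] array) by a direct pairwise
-- strict-domination test; objective: simpler. Equivalence of the return value is proved below.

-- ===== PORT A =====
def solution (scores : List (List Int)) : Int :=
  let failed : List Bool := scores.map (fun _ => false)
  let scoresE : List (Int × List Int) := PySem.List.enumerate scores
  let sortedScores := PySem.List.sorted2 scoresE
      (fun x => -(PySem.List.pyGetD x.2 0 0)) (fun x => PySem.List.pyGetD x.2 1 0)
  let maxValue := PySem.List.pyGetD (PySem.List.pyGetD sortedScores 0 (0, [])).2 1 0
  let st := sortedScores.foldl (fun (st : List Bool × Int) p =>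
      if PySem.List.pyGetD p.2 1 0 < st.2
      then (PySem.List.pySetD st.1 p.1 true, st.2)
      else (st.1, PySem.List.pyGetD p.2 1 0)) (failed, maxValue)
  if PySem.List.pyGetD st.1 0 false then -1
  else
    let myScore := (PySem.List.pyGetD scoresE 0 (0, [])).2.sum
    (scoresE.foldl (fun acc p =>
        if ¬ PySem.List.pyGetD st.1 p.1 false = true ∧ p.2.sum > myScore
        then acc + 1 else acc) 0) + 1

-- ===== PORT B =====
def dominatedBy (scores : List (List Int)) (s : List Int) : Bool :=
  scores.any (fun o => decide (PySem.List.pyGetD s 0 0 < PySem.List.pyGetD o 0 0) &&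
                       decide (PySem.List.pyGetD s 1 0 < PySem.List.pyGetD o 1 0))

def solution_alt (scores : List (List Int)) : Int :=
  let s0 := PySem.List.pyGetD scores 0 []
  if dominatedBy scores s0 then -1
  else
    let myScore := s0.sum
    1 + scores.foldl (fun acc s =>
        if s.sum > myScore ∧ ¬ dominatedBy scores s = true then acc + 1 else acc) 0

-- ===== PRECONDITION & SPEC =====
-- Pre_ excludes exactly the inputs where the Python A raises IndexError: the empty list
-- (sorted_scores[0]) and inner lists of length < 2 (score[1] in the sort key / loop).
def Pre_solution (scores : List (List Int)) : Prop :=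
  scores ≠ [] ∧ ∀ s ∈ scores, 2 ≤ s.length
instance (scores : List (List Int)) : Decidable (Pre_solution scores) := by
  unfold Pre_solution; infer_instance

def pvWitness_solution : List (List Int) := [[2, 2], [1, 4], [3, 2], [3, 3]]

def Spec_solution (scores : List (List Int)) (out : Int) : Prop := out = solution_alt scores
instance (scores : List (List Int)) (out : Int) : Decidable (Spec_solution scores out) := by
  unfold Spec_solution; infer_instance

-- ===== CLAIM (what is proved, stated in full; the proofs are below) =====
def Claim_equal_solution : Prop := ∀ (scores : List (List Int)), Dom_solution scores → Pre_solution scores → Spec_solution scores (solution scores)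

-- ===== LEMMAS AND PROOFS =====

-- ===== PRECONDITION & SPEC =====

def pvB (p : Int × List Int) : Int := PySem.List.pyGetD p.2 1 0
def pvA (p : Int × List Int) : Int := PySem.List.pyGetD p.2 0 0
def pvKey (p : Int × List Int) : Lex (Int × Int) := toLex (-(pvA p), pvB p)
def pvF (st : List Bool × Int) (p : Int × List Int) : List Bool × Int :=
  if pvB p < st.2 then (PySem.List.pySetD st.1 p.1 true, st.2) else (st.1, pvB p)
def pvMax (P : List (Int × List Int)) (m : Int) : Int := P.foldl (fun m q => max m (pvB q)) m

-- sorted2 with Int keys is sorted with the lexicographic key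
lemma sorted2_eq_sorted_lex {α : Type} (xs : List α) (k1 k2 : α → Int) :
    PySem.List.sorted2 xs k1 k2 = PySem.List.sorted xs (fun x => toLex (k1 x, k2 x)) := by
  have hbef : (fun (a b : α) => decide (k1 a < k1 b) || (!decide (k1 b < k1 a) && decide (k2 a < k2 b)))
      = fun a b => decide ((toLex (k1 a, k2 a) : Lex (Int × Int)) < toLex (k1 b, k2 b)) := by
    funext a b
    by_cases h1 : k1 a < k1 b <;> by_cases h2 : k1 b < k1 a <;>
      by_cases h3 : k2 a < k2 b <;>
      simp only [h1, h2, h3, Prod.Lex.lt_iff, ofLex_toLex, decide_true,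
        decide_false, Bool.not_true, Bool.not_false, Bool.and_true, Bool.and_false,
        Bool.or_true, Bool.or_false] <;> simp <;> omega
  rw [PySem.List.sorted_eq_foldl_insertBy]
  simp only [PySem.List.sorted2, hbef]
  simp

lemma foldl_pvF_untouched (S : List (Int × List Int)) (f : List Bool) (m : Int) (k : Nat)
    (hS : ∀ q ∈ S, 0 ≤ q.1 ∧ q.1 ≠ (k : Int)) :
    ((S.foldl pvF (f, m)).1).getD k false = f.getD k false := by
  induction S generalizing f m with
  | nil => rfl
  | cons q S ih =>
    have hq := hS q (by simp)
    have hrest : ∀ r ∈ S, 0 ≤ r.1 ∧ r.1 ≠ (k : Int) := fun r hr => hS r (by simp [hr])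
    simp only [List.foldl_cons, pvF]
    split
    · rw [ih _ _ hrest, PySem.List.pySetD_of_nonneg _ _ hq.1,
        List.getD, List.getElem?_set_ne (by omega), ← List.getD]
    · exact ih _ _ hrest

lemma foldl_pvF_main (P : List (Int × List Int)) (x : Int × List Int) (S : List (Int × List Int))
    (f : List Bool) (m : Int) (k : Nat) (hx : x.1 = (k : Int)) (hk : k < f.length)
    (hP : ∀ q ∈ P, 0 ≤ q.1 ∧ q.1 ≠ (k : Int)) (hS : ∀ q ∈ S, 0 ≤ q.1 ∧ q.1 ≠ (k : Int)) :
    (((P ++ x :: S).foldl pvF (f, m)).1).getD k false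
      = (f.getD k false || decide (pvB x < pvMax P m)) := by
  induction P generalizing f m with
  | nil =>
    simp only [List.nil_append, List.foldl_cons, pvF, pvMax, List.foldl_nil]
    split
    · rw [foldl_pvF_untouched _ _ _ _ hS, hx, PySem.List.pySetD_natCast,
        List.getD, List.getElem?_set_self hk]
      simp_all
    · rw [foldl_pvF_untouched _ _ _ _ hS]
      simp_all
  | cons q P ih =>
    have hq := hP q (by simp)
    have hrest : ∀ r ∈ P, 0 ≤ r.1 ∧ r.1 ≠ (k : Int) := fun r hr => hP r (by simp [hr])
    simp only [List.cons_append, List.foldl_cons, pvF]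
    split
    · rename_i hlt
      rw [ih _ _ (by rw [PySem.List.length_pySetD]; exact hk) hrest,
        PySem.List.pySetD_of_nonneg _ _ hq.1,
        List.getD, List.getElem?_set_ne (by omega), ← List.getD]
      have : pvMax (q :: P) m = pvMax P m := by
        simp only [pvMax, List.foldl_cons]
        congr 1
        have hlt' : pvB q < m := hlt
        omega
      rw [this]
    · rename_i hge
      rw [ih _ _ hk hrest]
      have : pvMax (q :: P) m = pvMax P (pvB q) := by
        simp only [pvMax, List.foldl_cons]
        congr 1; omega
      rw [this]

lemma lt_pvMax_iff (P : List (Int × List Int)) (m c : Int) :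
    c < pvMax P m ↔ c < m ∨ ∃ q ∈ P, c < pvB q := by
  induction P generalizing m with
  | nil => simp [pvMax]
  | cons q P ih =>
    simp only [pvMax, List.foldl_cons] at *
    rw [ih]
    constructor
    · rintro (h | h)
      · rcases lt_max_iff.mp h with h | h
        · exact Or.inl h
        · exact Or.inr ⟨q, by simp, h⟩
      · rcases h with ⟨r, hr, h⟩
        exact Or.inr ⟨r, by simp [hr], h⟩
    · rintro (h | ⟨r, hr, h⟩)
      · exact Or.inl (lt_max_iff.mpr (Or.inl h))
      · rcases List.mem_cons.mp hr with rfl | hr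
        · exact Or.inl (lt_max_iff.mpr (Or.inr h))
        · exact Or.inr ⟨r, hr, h⟩

lemma dominatedBy_iff (scores : List (List Int)) (s : List Int) :
    dominatedBy scores s = true
      ↔ ∃ o ∈ scores, PySem.List.pyGetD s 0 0 < PySem.List.pyGetD o 0 0
          ∧ PySem.List.pyGetD s 1 0 < PySem.List.pyGetD o 1 0 := by
  simp [dominatedBy]

lemma pvKey_le_iff (q x : Int × List Int) :
    pvKey q ≤ pvKey x ↔ (pvA x < pvA q ∨ (pvA q = pvA x ∧ pvB q ≤ pvB x)) := by
  simp only [pvKey, Prod.Lex.le_iff, ofLex_toLex]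
  constructor
  · rintro (h | ⟨h1, h2⟩)
    · exact Or.inl (by omega)
    · exact Or.inr ⟨by omega, h2⟩
  · rintro (h | ⟨h1, h2⟩)
    · exact Or.inl (by omega)
    · exact Or.inr ⟨by omega, h2⟩

lemma lt_pvMax_iff_dom (P S : List (Int × List Int)) (x : Int × List Int)
    (hpw : (P ++ x :: S).Pairwise (fun a b => pvKey a ≤ pvKey b)) :
    pvB x < pvMax P (pvB (PySem.List.pyGetD (P ++ x :: S) 0 (0, [])))
      ↔ ∃ q ∈ P ++ x :: S, pvA x < pvA q ∧ pvB x < pvB q := by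
  obtain ⟨hpwP, hpwxS, hcross⟩ := List.pairwise_append.mp hpw
  obtain ⟨hxS, _⟩ := List.pairwise_cons.mp hpwxS
  cases P with
  | nil =>
    simp only [List.nil_append, PySem.List.pyGetD_zero_cons, pvMax, List.foldl_nil]
    constructor
    · intro h; omega
    · rintro ⟨q, hq, ha, hb⟩
      rcases List.mem_cons.mp hq with rfl | hq
      · omega
      · rcases (pvKey_le_iff x q).mp (hxS q hq) with h | ⟨h1, _⟩ <;> omega
  | cons h P' =>
    have hm0 : PySem.List.pyGetD ((h :: P') ++ x :: S) 0 (0, []) = h := by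
      simp [PySem.List.pyGetD_zero_cons]
    rw [hm0]
    have hmax : pvMax (h :: P') (pvB h) = pvMax P' (pvB h) := by
      simp [pvMax]
    rw [hmax, lt_pvMax_iff]
    constructor
    · intro hcase
      have : ∃ q ∈ h :: P', pvB x < pvB q := by
        rcases hcase with h1 | ⟨q, hq, h1⟩
        · exact ⟨h, by simp, h1⟩
        · exact ⟨q, by simp [hq], h1⟩
      obtain ⟨q, hq, hb⟩ := this
      have hle := hcross q hq x (by simp)
      rcases (pvKey_le_iff q x).mp hle with ha | ⟨_, hble⟩
      · refine ⟨q, ?_, ha, hb⟩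
        rcases List.mem_cons.mp hq with rfl | hq'
        · simp
        · simp [hq']
      · omega
    · rintro ⟨q, hq, ha, hb⟩
      rcases List.mem_append.mp hq with hqP | hqxS
      · rcases List.mem_cons.mp hqP with rfl | hqP'
        · exact Or.inl hb
        · exact Or.inr ⟨q, hqP', hb⟩
      · rcases List.mem_cons.mp hqxS with rfl | hqS
        · omega
        · rcases (pvKey_le_iff x q).mp (hxS q hqS) with h1 | ⟨h1, _⟩ <;> omega

lemma failed_getD_eq (scores : List (List Int)) (k : Nat) (hk : k < scores.length) :
    (((PySem.List.sorted (PySem.List.enumerate scores) pvKey).foldl pvF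
        (scores.map (fun _ => false),
         pvB (PySem.List.pyGetD (PySem.List.sorted (PySem.List.enumerate scores) pvKey) 0 (0, [])))).1).getD k false
      = dominatedBy scores scores[k] := by
  set E := PySem.List.enumerate scores with hE
  set L := PySem.List.sorted E pvKey with hLdef
  have hperm : L.Perm E := PySem.List.sorted_perm E pvKey false
  have hpw : L.Pairwise (fun a b => pvKey a ≤ pvKey b) := PySem.List.sorted_pairwise E pvKey
  have hxE : ((k : Int), scores[k]) ∈ E := by
    rw [hE, PySem.List.mem_enumerate_iff]
    exact ⟨k, hk, by simp⟩
  have hxL : ((k : Int), scores[k]) ∈ L := hperm.mem_iff.mpr hxE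
  obtain ⟨P, S, hL⟩ := List.append_of_mem hxL
  have hnd : (L.map (·.1)).Nodup := by
    refine (hperm.map (·.1)).nodup_iff.mpr ?_
    rw [hE, PySem.List.map_fst_enumerate]
    exact PySem.List.nodup_pyRange_one _ _
  have hndPS : ∀ q ∈ P ++ S, q.1 ≠ (k : Int) := by
    intro q hq hqk
    rw [hL, List.map_append, List.map_cons] at hnd
    rcases List.mem_append.mp hq with hqP | hqS
    · have hd := (List.nodup_append.mp hnd).2.2
      have h1 : q.1 ∈ List.map (fun x => x.1) P := List.mem_map_of_mem hqP
      have h2 : ((k : Int), scores[k]).1 ∈ ((k : Int), scores[k]).1 :: List.map (fun x => x.1) S := by simp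
      have := hd _ h1 _ h2
      exact this (by simpa using hqk)
    · have hd := (List.nodup_cons.mp (List.nodup_append.mp hnd).2.1).1
      have h1 : q.1 ∈ List.map (fun x => x.1) S := List.mem_map_of_mem hqS
      rw [hqk] at h1
      exact hd (by simpa using h1)
  have hnonneg : ∀ q ∈ L, 0 ≤ q.1 := by
    intro q hq
    obtain ⟨j, hj, rfl⟩ := by
      rw [hperm.mem_iff, hE, PySem.List.mem_enumerate_iff] at hq
      exact hq
    simp
  have hcond : ∀ q ∈ P ++ S, 0 ≤ q.1 ∧ q.1 ≠ (k : Int) := by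
    intro q hq
    refine ⟨hnonneg q ?_, hndPS q hq⟩
    rw [hL]
    rcases List.mem_append.mp hq with h | h
    · exact List.mem_append.mpr (Or.inl h)
    · exact List.mem_append.mpr (Or.inr (List.mem_cons_of_mem _ h))
  rw [hL, foldl_pvF_main P _ S _ _ k rfl (by simpa using hk)
      (fun q hq => hcond q (List.mem_append.mpr (Or.inl hq)))
      (fun q hq => hcond q (List.mem_append.mpr (Or.inr hq)))]
  have hf0 : (scores.map (fun _ => false)).getD k false = false := by
    simp [List.getD, hk]
  rw [hf0, Bool.false_or]
  rw [hL] at hpw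
  have hiff := lt_pvMax_iff_dom P S _ hpw
  rw [Bool.eq_iff_iff, decide_eq_true_iff, hiff, dominatedBy_iff]
  constructor
  · rintro ⟨q, hq, ha, hb⟩
    refine ⟨q.2, ?_, ha, hb⟩
    have : q ∈ E := hperm.mem_iff.mp (by rw [hL]; exact hq)
    rw [hE, PySem.List.mem_enumerate_iff] at this
    obtain ⟨j, hj, rfl⟩ := this
    simp
  · rintro ⟨o, ho, ha, hb⟩
    obtain ⟨j, hj, hoj⟩ := List.mem_iff_getElem.mp ho
    refine ⟨((j : Int), o), ?_, ha, hb⟩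
    rw [← hL]
    exact hperm.mem_iff.mpr (by rw [hE, PySem.List.mem_enumerate_iff]; exact ⟨j, hj, by simp [hoj]⟩)

-- ===== VERDICT (by name: the statement is the Claim_ definition above) =====
theorem solution_spec : Claim_equal_solution := by
  intro scores hdom hpre
  obtain ⟨hne, hlen⟩ := hpre
  unfold Spec_solution
  obtain ⟨s, t, rfl⟩ : ∃ s t, scores = s :: t := by
    cases scores with
    | nil => exact absurd rfl hne
    | cons s t => exact ⟨s, t, rfl⟩
  simp only [solution, solution_alt]
  rw [show PySem.List.sorted2 (PySem.List.enumerate (s :: t))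
        (fun x => -PySem.List.pyGetD x.2 0 0) (fun x => PySem.List.pyGetD x.2 1 0)
      = PySem.List.sorted (PySem.List.enumerate (s :: t)) pvKey from by
    rw [sorted2_eq_sorted_lex]; rfl]
  rw [show (fun (st : List Bool × Int) (p : Int × List Int) =>
      if PySem.List.pyGetD p.2 1 0 < st.2 then (PySem.List.pySetD st.1 p.1 true, st.2)
      else (st.1, PySem.List.pyGetD p.2 1 0)) = pvF from rfl]
  rw [show PySem.List.pyGetD
        (PySem.List.pyGetD (PySem.List.sorted (PySem.List.enumerate (s :: t)) pvKey) 0 (0, ([] : List Int))).2 1 0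
      = pvB (PySem.List.pyGetD (PySem.List.sorted (PySem.List.enumerate (s :: t)) pvKey) 0 (0, [])) from rfl]
  rw [PySem.List.pyGetD_zero (d := false), failed_getD_eq (s :: t) 0 (by simp)]
  rw [PySem.List.pyGetD_zero_cons]
  simp only [List.getElem_cons_zero]
  by_cases hd : dominatedBy (s :: t) s = true
  · simp [hd]
  · simp only [hd, if_false, Bool.false_eq_true]
    rw [show (PySem.List.pyGetD (PySem.List.enumerate (s :: t)) 0 ((0 : Int), ([] : List Int))).2
        = s from by rw [PySem.List.enumerate_cons, PySem.List.pyGetD_zero_cons]]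
    rw [PySem.List.foldl_congr_mem _ _
        (fun acc p => (fun (acc : Int) (s' : List Int) =>
          if s'.sum > s.sum ∧ ¬ dominatedBy (s :: t) s' = true then acc + 1 else acc) acc p.2) _
        (by
          intro acc p hp
          obtain ⟨j, hj, rfl⟩ := (PySem.List.mem_enumerate_iff _ _ _).mp hp
          simp only [zero_add, PySem.List.pyGetD_natCast]
          rw [failed_getD_eq (s :: t) j hj]
          exact if_congr (by tauto) rfl rfl)]
    rw [← List.foldl_map (f := fun (p : Int × List Int) => p.2)
        (g := fun (acc : Int) (s' : List Int) =>
          if s'.sum > s.sum ∧ ¬ dominatedBy (s :: t) s' = true then acc + 1 else acc)]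
    rw [PySem.List.map_snd_enumerate]
    omega
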